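-- pv_equiv track=rewrite | github.com/lodekeeper/dotfiles | skills/log-reader/scripts/overview.py | enforce_budget
-- ===== SOURCE A (Python) =====
-- def enforce_budget(sections: list[str], max_chars: int) -> str:
--     """Join sections while respecting an approximate token budget."""
--
--     output: list[str] = []
--     current = 0
--     for section in sections:
--         addition = section + "\n\n"
--         if output and current + len(addition) > max_chars:
--             break
--         output.append(section)
--         current += len(addition)
--     return "\n\n".join(output).rstrip() + "\n"
-- ===== SOURCE B (Python) =====
-- def enforce_budget(sections: list[str], max_chars: int) -> str:
--     """Join sections while respecting an approximate token budget.
--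
--     Table-build-then-filter decomposition: precompute the running prefix
--     sums of the section sizes, then keep exactly the sections whose
--     cumulative size fits the budget (the first one is always kept).
--     Because every size is positive the prefix sums are strictly
--     increasing, so this filter selects the same contiguous prefix as the
--     original accumulate-and-break loop.
--     """
--     cums = []
--     total = 0
--     for s in sections:
--         total += len(s) + 2
--         cums.append(total)
--     output = [s for i, (s, c) in enumerate(zip(sections, cums))
--               if i == 0 or c <= max_chars]
--     return "\n\n".join(output).rstrip() + "\n"
-- ===== Notes on version B (the rewrite author's own statement) =====
-- stated objective: alternative
-- what changed: Replaces the inline accumulate-and-break loop with a prefix-sum table built in a pre-pass followed by an index/cumulative filter over enumerate(zip(...)), relying on strictly increasing prefix sums to reproduce the greedy contiguous cut.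
import Mathlib
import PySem

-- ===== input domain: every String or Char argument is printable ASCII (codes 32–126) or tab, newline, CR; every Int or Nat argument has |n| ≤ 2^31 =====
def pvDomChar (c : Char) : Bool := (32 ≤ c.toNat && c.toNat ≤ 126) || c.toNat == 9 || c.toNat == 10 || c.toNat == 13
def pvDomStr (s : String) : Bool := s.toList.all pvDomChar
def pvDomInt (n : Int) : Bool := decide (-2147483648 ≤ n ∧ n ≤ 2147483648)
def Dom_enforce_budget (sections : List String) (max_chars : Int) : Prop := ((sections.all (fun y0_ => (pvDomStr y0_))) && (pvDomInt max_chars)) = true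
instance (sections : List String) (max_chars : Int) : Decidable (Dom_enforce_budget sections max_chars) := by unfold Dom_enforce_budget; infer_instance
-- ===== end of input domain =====

-- B rebuilds A's greedy cut as a prefix-sum table plus an index/cumulative filter (alternative decomposition, same cost).

-- ===== PORT A =====
-- the for-loop with break, state (output, current)
def enforce_budget_go (max_chars : Int) : List String → List String → Int → List String
  | [], output, _ => output
  | section_ :: rest, output, current =>
    let addition := section_ ++ "\n\n"
    if output ≠ [] ∧ current + PySem.Str.len addition > max_chars then output
    else enforce_budget_go max_chars rest (output ++ [section_]) (current + PySem.Str.len addition)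

def enforce_budget (sections : List String) (max_chars : Int) : String :=
  PySem.Str.rstrip (PySem.Str.join "\n\n" (enforce_budget_go max_chars sections [] 0)) ++ "\n"

-- ===== PORT B =====
-- the pre-pass building the running prefix sums (cums)
def enforce_budget_cums : List String → Int → List Int
  | [], _ => []
  | s :: rest, total =>
    let t := total + (PySem.Str.len s + 2)
    t :: enforce_budget_cums rest t

def enforce_budget_alt (sections : List String) (max_chars : Int) : String :=
  let cums := enforce_budget_cums sections 0
  let output := ((PySem.List.enumerate (sections.zip cums) 0).filter
      (fun p => p.1 == 0 || decide (p.2.2 ≤ max_chars))).map (fun p => p.2.1)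
  PySem.Str.rstrip (PySem.Str.join "\n\n" output) ++ "\n"

-- ===== PRECONDITION & SPEC =====
def Spec_enforce_budget (sections : List String) (max_chars : Int) (out : String) : Prop := out = enforce_budget_alt sections max_chars
instance (sections : List String) (max_chars : Int) (out : String) : Decidable (Spec_enforce_budget sections max_chars out) := by unfold Spec_enforce_budget; infer_instance

-- ===== CLAIM (what is proved, stated in full; the proofs are below) =====
def Claim_equal_enforce_budget : Prop := ∀ (sections : List String) (max_chars : Int), Dom_enforce_budget sections max_chars → Spec_enforce_budget sections max_chars (enforce_budget sections max_chars)

-- ===== LEMMAS AND PROOFS =====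

theorem len_addition (s : String) : PySem.Str.len (s ++ "\n\n") = PySem.Str.len s + 2 := by
  simp [PySem.Str.len_eq]

theorem len_nonneg (s : String) : 0 ≤ PySem.Str.len s := by
  simp [PySem.Str.len_eq]

-- every entry of the prefix-sum table exceeds its starting total
theorem cums_gt (l : List String) (t : Int) : ∀ c ∈ enforce_budget_cums l t, t < c := by
  induction l generalizing t with
  | nil => simp [enforce_budget_cums]
  | cons s rest ih =>
    intro c hc
    simp only [enforce_budget_cums, List.mem_cons] at hc
    have hs := len_nonneg s
    rcases hc with h | h
    · omega
    · have := ih (t + (PySem.Str.len s + 2)) c h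
      omega

-- A's loop from a nonempty state equals appending the cumulative filter of the remainder
theorem go_eq_filter (max_chars : Int) (l : List String) (acc : List String) (cur : Int)
    (hacc : acc ≠ []) :
    enforce_budget_go max_chars l acc cur =
      acc ++ ((l.zip (enforce_budget_cums l cur)).filter
        (fun p => decide (p.2 ≤ max_chars))).map (fun p => p.1) := by
  induction l generalizing acc cur with
  | nil => simp [enforce_budget_go, enforce_budget_cums]
  | cons s rest ih =>
    simp only [enforce_budget_go, enforce_budget_cums, List.zip_cons_cons, List.filter_cons]
    rw [len_addition]
    by_cases h : cur + (PySem.Str.len s + 2) > max_chars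
    · rw [if_pos ⟨hacc, by omega⟩]
      have hnone : ((rest.zip (enforce_budget_cums rest (cur + (PySem.Str.len s + 2)))).filter
          (fun p => decide (p.2 ≤ max_chars))) = [] := by
        rw [List.filter_eq_nil_iff]
        intro p hp
        have hmem : p.2 ∈ enforce_budget_cums rest (cur + (PySem.Str.len s + 2)) :=
          (List.of_mem_zip hp).2
        have hgt := cums_gt rest (cur + (PySem.Str.len s + 2)) p.2 hmem
        simp only [PySem.Str.len_eq] at *
        simp only [decide_eq_true_eq]
        omega
      split_ifs with h2
      · simp only [decide_eq_true_eq] at h2; omega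
      · simp only [PySem.Str.len_eq] at hnone ⊢
        rw [hnone]
        simp
    · rw [if_neg (by intro hh; exact h hh.2)]
      rw [ih (acc ++ [s]) (cur + (PySem.Str.len s + 2)) (by simp)]
      split_ifs with h2
      · simp
      · simp only [decide_eq_true_eq] at h2; omega

-- the enumerate filter with a positive start index degenerates to the cumulative filter
theorem enumerate_filter_pos {α : Type} (max_chars : Int) (z : List (α × Int)) (n : Int)
    (hn : 0 < n) :
    ((PySem.List.enumerate z n).filter
        (fun p => p.1 == 0 || decide (p.2.2 ≤ max_chars))).map (fun p => p.2.1) =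
      (z.filter (fun p => decide (p.2 ≤ max_chars))).map (fun p => p.1) := by
  induction z generalizing n with
  | nil => simp [PySem.List.enumerate_nil]
  | cons p rest ih =>
    rw [PySem.List.enumerate_cons]
    simp only [List.filter_cons]
    have hne : (n == (0 : Int)) = false := by simp; omega
    simp only [hne, Bool.false_or]
    split_ifs with h
    · simp only [List.map_cons]
      rw [ih (n + 1) (by omega)]
    · rw [ih (n + 1) (by omega)]

theorem outputs_eq (sections : List String) (max_chars : Int) :
    enforce_budget_go max_chars sections [] 0 =
      ((PySem.List.enumerate (sections.zip (enforce_budget_cums sections 0)) 0).filter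
        (fun p => p.1 == 0 || decide (p.2.2 ≤ max_chars))).map (fun p => p.2.1) := by
  cases sections with
  | nil => simp [enforce_budget_go, enforce_budget_cums, PySem.List.enumerate_nil]
  | cons s rest =>
    simp only [enforce_budget_go, enforce_budget_cums, List.zip_cons_cons,
      PySem.List.enumerate_cons]
    rw [if_neg (by simp)]
    simp only [List.filter_cons, List.nil_append]
    rw [go_eq_filter max_chars rest [s] (0 + PySem.Str.len (s ++ "\n\n")) (by simp)]
    rw [len_addition]
    split_ifs with h0
    · simp only [List.map_cons]
      rw [enumerate_filter_pos max_chars _ (0 + 1) (by omega)]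
      simp
    · exact absurd (by simp) h0

-- ===== VERDICT (by name: the statement is the Claim_ definition above) =====
theorem enforce_budget_spec : Claim_equal_enforce_budget := by
  intro sections max_chars _
  unfold Spec_enforce_budget enforce_budget enforce_budget_alt
  rw [outputs_eq]
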